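-- pv_equiv track=rewrite | github.com/Supporter09/BTVN_HDT_A03 | Python/python31_5/btvn.py | minTiles
-- ===== SOURCE A (Python) =====
-- def minTiles(n,m):
--     if n == 0 and m ==0:
--         return 0
--
--     elif n%2 == 0 and m %2==0:
--         return minTiles(int(n/2), int(m/2))
--
--     elif n%2 == 0 and m % 2== 1:
--         return(n + minTiles(int(n/2), int(m/2)))
--
--     elif  n%2 == 1 and m%2 ==0 :
--         return ( m + minTiles(int(n/2), int(m/2)))
--
--     else:
--         return(n +m -1 + minTiles(int(n/2), int(m/2)))
-- ===== SOURCE B (Python) =====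
-- def minTiles(n, m):
--     # Branch-free iterative version: each halving step contributes
--     # m%2*n + n%2*m - n%2*m%2, which equals A's four-way parity cases.
--     total = 0
--     while n != 0 or m != 0:
--         pn, pm = n % 2, m % 2
--         total += pm * n + pn * m - pn * pm
--         n, m = int(n / 2), int(m / 2)
--     return total
-- ===== Notes on version B (the rewrite author's own statement) =====
-- stated objective: alternative
-- what changed: Replaces the four-branch recursion with an iterative accumulator loop whose per-step contribution is the single branch-free arithmetic formula m%2*n + n%2*m - n%2*m%2.
import Mathlib
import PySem

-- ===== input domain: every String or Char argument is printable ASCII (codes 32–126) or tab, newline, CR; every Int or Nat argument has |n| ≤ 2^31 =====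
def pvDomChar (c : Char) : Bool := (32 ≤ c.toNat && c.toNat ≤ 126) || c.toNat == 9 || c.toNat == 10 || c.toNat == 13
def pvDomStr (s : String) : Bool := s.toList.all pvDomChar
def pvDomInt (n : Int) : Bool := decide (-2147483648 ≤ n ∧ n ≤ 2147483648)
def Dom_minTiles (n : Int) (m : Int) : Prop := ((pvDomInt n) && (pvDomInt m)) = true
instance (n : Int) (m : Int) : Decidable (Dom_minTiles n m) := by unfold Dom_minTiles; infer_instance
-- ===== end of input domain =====

-- B replaces A's four-branch recursion with an iterative loop adding the branch-free
-- per-step term m%2*n + n%2*m - n%2*m%2 (alternative decomposition, same cost).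
-- int(n/2) truncates toward zero = Int.tdiv (float division is exact for |n| ≤ 2^31).
-- Both ports use a Nat fuel (n.natAbs + m.natAbs + 1) only to make the recursion structural;
-- the fuel is proved sufficient below, so it never changes the computed value on any input.

-- ===== PORT A =====
def minTilesGo : Nat → Int → Int → Int
  | 0, _, _ => 0   -- never reached with the fuel minTiles supplies (proved below)
  | (k+1), n, m =>
    if n = 0 ∧ m = 0 then 0
    else if PySem.Int.mod n 2 = 0 ∧ PySem.Int.mod m 2 = 0 then
      minTilesGo k (n.tdiv 2) (m.tdiv 2)
    else if PySem.Int.mod n 2 = 0 ∧ PySem.Int.mod m 2 = 1 then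
      n + minTilesGo k (n.tdiv 2) (m.tdiv 2)
    else if PySem.Int.mod n 2 = 1 ∧ PySem.Int.mod m 2 = 0 then
      m + minTilesGo k (n.tdiv 2) (m.tdiv 2)
    else
      n + m - 1 + minTilesGo k (n.tdiv 2) (m.tdiv 2)

def minTiles (n : Int) (m : Int) : Int := minTilesGo (n.natAbs + m.natAbs + 1) n m

-- ===== PORT B =====
-- the while loop of Source B, as a tail-recursive helper threading the accumulator `total`
def minTilesLoop : Nat → Int → Int → Int → Int
  | 0, _, _, total => total   -- never reached with the fuel minTiles_alt supplies (proved below)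
  | (k+1), n, m, total =>
    if n ≠ 0 ∨ m ≠ 0 then
      minTilesLoop k (n.tdiv 2) (m.tdiv 2)
        (total + PySem.Int.mod m 2 * n + PySem.Int.mod n 2 * m
               - PySem.Int.mod n 2 * PySem.Int.mod m 2)
    else total

def minTiles_alt (n : Int) (m : Int) : Int := minTilesLoop (n.natAbs + m.natAbs + 1) n m 0

-- ===== PRECONDITION & SPEC =====
def Spec_minTiles (n : Int) (m : Int) (out : Int) : Prop := out = minTiles_alt n m
instance (n : Int) (m : Int) (out : Int) : Decidable (Spec_minTiles n m out) := by unfold Spec_minTiles; infer_instance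

-- ===== CLAIM =====
def Claim_equal_minTiles : Prop := ∀ (n : Int) (m : Int), Dom_minTiles n m → Spec_minTiles n m (minTiles n m)

-- ===== LEMMAS AND PROOFS =====
theorem pvHalfAbs (n : Int) : (n.tdiv 2).natAbs = n.natAbs / 2 := Int.natAbs_tdiv n 2

theorem pvMod2 (m : Int) : PySem.Int.mod m 2 = 0 ∨ PySem.Int.mod m 2 = 1 := by
  rw [PySem.Int.mod_eq_emod_of_pos (by norm_num)]; omega

theorem pvLoop_eq (k : Nat) : ∀ (n m total : Int), n.natAbs + m.natAbs < k →
    minTilesLoop k n m total = total + minTilesGo k n m := by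
  induction k with
  | zero => intro n m total hk; omega
  | succ k ih =>
    intro n m total hk
    by_cases h0 : n = 0 ∧ m = 0
    · simp [minTilesLoop, minTilesGo, h0]
    · have hne : n ≠ 0 ∨ m ≠ 0 := by tauto
      have hlt : (n.tdiv 2).natAbs + (m.tdiv 2).natAbs < k := by
        have h1 : n.natAbs + m.natAbs ≠ 0 := by
          intro h; exact h0 ⟨by omega, by omega⟩
        simp only [pvHalfAbs]; omega
      rw [minTilesLoop, minTilesGo]
      simp only [if_pos hne, if_neg h0]
      rcases pvMod2 n with hn | hn <;> rcases pvMod2 m with hm | hm <;>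
        simp only [hn, hm, and_self, and_true, true_and, and_false, false_and,
          one_ne_zero, ite_true, ite_false] <;>
        rw [ih _ _ _ hlt] <;> ring

-- ===== VERDICT =====
theorem minTiles_spec : Claim_equal_minTiles := by
  intro n m _
  unfold Spec_minTiles minTiles_alt minTiles
  rw [pvLoop_eq (n.natAbs + m.natAbs + 1) n m 0 (by omega)]; ring
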